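-- pv_equiv track=rewrite | github.com/MrBrantCode/unitest_baseline | mut_generate/mist_train_cf/cf_13017/solution.py | find_the_index
-- ===== SOURCE A (Python) =====
-- def find_the_index(sentence):
--     def caesar_decode(sentence, shift):
--         decoded_sentence = ""
--         for char in sentence:
--             if char.isalpha():
--                 char_code = ord(char.lower()) - shift
--                 if char_code < ord('a'):
--                     char_code += 26
--                 decoded_sentence += chr(char_code)
--             else:
--                 decoded_sentence += char
--         return decoded_sentence
--
--     index = -1
--     for shift in range(1, 26):
--         decoded_sentence = caesar_decode(sentence, shift)
--         if "the" in decoded_sentence.lower():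
--             index = decoded_sentence.lower().index("the")
--             break
--     return index
-- ===== SOURCE B (Python) =====
-- def find_the_index(sentence):
--     # Single pass: each 3-letter window determines its required Caesar shift;
--     # keep the lexicographically smallest (shift, index) pair.
--     s = sentence.lower()
--     best = None
--     for i, (a, b, c) in enumerate(zip(s, s[1:], s[2:])):
--         if a.isalpha() and b.isalpha() and c.isalpha():
--             sh = (ord(a) - ord('t')) % 26
--             if sh != 0 and (ord(b) - ord('h')) % 26 == sh and (ord(c) - ord('e')) % 26 == sh:
--                 if best is None or (sh, i) < best:
--                     best = (sh, i)
--     return -1 if best is None else best[1]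
-- ===== Notes on version B (the rewrite author's own statement) =====
-- stated objective: faster
-- what changed: Instead of trying all 25 shifts and rebuilding+searching the decoded string each time, B makes a single pass over 3-character windows: each all-letter window determines its unique required shift, and B keeps the lexicographically smallest (shift, index) pair.
import Mathlib
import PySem

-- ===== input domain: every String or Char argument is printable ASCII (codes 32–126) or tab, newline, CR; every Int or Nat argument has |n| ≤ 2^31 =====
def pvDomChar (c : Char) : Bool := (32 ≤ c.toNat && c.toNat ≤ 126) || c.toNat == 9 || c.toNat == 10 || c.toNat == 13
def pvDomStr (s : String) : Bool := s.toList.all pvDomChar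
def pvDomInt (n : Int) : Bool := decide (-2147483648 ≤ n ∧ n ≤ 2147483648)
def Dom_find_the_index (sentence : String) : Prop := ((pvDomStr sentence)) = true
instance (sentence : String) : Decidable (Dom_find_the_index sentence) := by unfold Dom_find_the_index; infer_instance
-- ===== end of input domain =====

-- B replaces A's 25 decode-and-search passes by one pass over 3-letter windows,
-- each of which determines its unique required shift (objective: faster, constant factor).

-- ===== PORT A =====
-- helper caesar_decode: builds the decoded string char by char (char-level lower/isalpha
-- are exact on the printable-ASCII domain)
def pvCaesarDecode (s : List Char) (shift : Int) : List Char :=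
  s.foldl (fun acc c =>
    if PySem.Chars.isalpha c then
      let code : Int := ((PySem.Chars.lowerChar c).toNat : Int) - shift
      let code2 : Int := if code < 97 then code + 26 else code
      acc ++ [Char.ofNat code2.toNat]
    else acc ++ [c]) []

-- the `for shift in range(1, 26): … break` loop with its `index = -1` default
def pvALoop (s : List Char) : List Int → Int
  | [] => -1
  | shift :: rest =>
    let decoded := pvCaesarDecode s shift
    if PySem.Chars.isIn ['t', 'h', 'e'] (PySem.Chars.lower decoded) then
      PySem.Chars.find (PySem.Chars.lower decoded) ['t', 'h', 'e']
    else pvALoop s rest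

def find_the_index (sentence : String) : Int :=
  pvALoop sentence.toList (PySem.List.pyRange 1 26)

-- ===== PORT B =====
-- single pass over the zipped 3-char windows of sentence.lower(), keeping the
-- lexicographically smallest (shift, index) pair (i is the enumerate index, a Nat)
def pvBLoop : Option (Int × Nat) → Nat → List Char → Option (Int × Nat)
  | best, i, a :: b :: c :: rest =>
    let best' :=
      if PySem.Chars.isalpha a && PySem.Chars.isalpha b && PySem.Chars.isalpha c then
        let sh := PySem.Int.mod ((a.toNat : Int) - 116) 26
        if sh ≠ 0 ∧ PySem.Int.mod ((b.toNat : Int) - 104) 26 = sh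
            ∧ PySem.Int.mod ((c.toNat : Int) - 101) 26 = sh then
          match best with
          | none => some (sh, i)
          | some q => if sh < q.1 ∨ (sh = q.1 ∧ i < q.2) then some (sh, i) else some q
        else best
      else best
    pvBLoop best' (i + 1) (b :: c :: rest)
  | best, _, _ => best

def find_the_index_alt (sentence : String) : Int :=
  match pvBLoop none 0 (PySem.Chars.lower sentence.toList) with
  | none => -1
  | some q => (q.2 : Int)

-- ===== PRECONDITION & SPEC =====
def Spec_find_the_index (sentence : String) (out : Int) : Prop := out = find_the_index_alt sentence
instance (sentence : String) (out : Int) : Decidable (Spec_find_the_index sentence out) := by unfold Spec_find_the_index; infer_instance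

-- ===== CLAIM (what is proved, stated in full; the proofs are below) =====
def Claim_equal_find_the_index : Prop := ∀ (sentence : String), Dom_find_the_index sentence → Spec_find_the_index sentence (find_the_index sentence)

-- ===== LEMMAS AND PROOFS =====

def pvCandAt (L : List Char) (j : Nat) : Option Int :=
  match L[j]?, L[j+1]?, L[j+2]? with
  | some a, some b, some c =>
    if PySem.Chars.isalpha a && PySem.Chars.isalpha b && PySem.Chars.isalpha c then
      let sh := PySem.Int.mod ((a.toNat : Int) - 116) 26
      if sh ≠ 0 ∧ PySem.Int.mod ((b.toNat : Int) - 104) 26 = sh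
          ∧ PySem.Int.mod ((c.toNat : Int) - 101) 26 = sh then some sh else none
    else none
  | _, _, _ => none

def pvLexLt (p q : Int × Nat) : Prop := p.1 < q.1 ∨ (p.1 = q.1 ∧ p.2 < q.2)

def pvIsBest (L : List Char) : Option (Int × Nat) → Prop
  | none => ∀ j, pvCandAt L j = none
  | some p => pvCandAt L p.2 = some p.1 ∧
      ∀ j sh, pvCandAt L j = some sh → ¬ pvLexLt (sh, j) p

def pvPartialBest (L : List Char) (i : Nat) : Option (Int × Nat) → Prop
  | none => ∀ j, j < i → pvCandAt L j = none
  | some p => p.2 < i ∧ pvCandAt L p.2 = some p.1 ∧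
      ∀ j sh, j < i → pvCandAt L j = some sh → ¬ pvLexLt (sh, j) p

def pvIdxOf : Option (Int × Nat) → Int
  | none => -1
  | some p => (p.2 : Int)

theorem pv_isupper_iff (c : Char) : PySem.Chars.isupper c = true ↔ 65 ≤ c.toNat ∧ c.toNat ≤ 90 := by
  simp only [PySem.Chars.isupper, Char.le_def, UInt32.le_iff_toNat_le, Char.toNat_val,
    Bool.and_eq_true, decide_eq_true_eq]
  simp [show 'A'.toNat = 65 from rfl, show 'Z'.toNat = 90 from rfl]
theorem pv_islower_iff (c : Char) : PySem.Chars.islower c = true ↔ 97 ≤ c.toNat ∧ c.toNat ≤ 122 := by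
  simp only [PySem.Chars.islower, Char.le_def, UInt32.le_iff_toNat_le, Char.toNat_val,
    Bool.and_eq_true, decide_eq_true_eq]
  simp [show 'a'.toNat = 97 from rfl, show 'z'.toNat = 122 from rfl]
theorem pv_isalpha_iff (c : Char) : PySem.Chars.isalpha c = true ↔
    (65 ≤ c.toNat ∧ c.toNat ≤ 90) ∨ (97 ≤ c.toNat ∧ c.toNat ≤ 122) := by
  simp [PySem.Chars.isalpha, pv_isupper_iff, pv_islower_iff]
theorem pv_char_eq_iff (a b : Char) : a = b ↔ a.toNat = b.toNat := by
  constructor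
  · intro h; rw [h]
  · intro h; rw [← Char.ofNat_toNat a, ← Char.ofNat_toNat b, h]
theorem pv_toNat_ofNat (n : Nat) (h : n < 55296) : (Char.ofNat n).toNat = n := by
  rw [Char.toNat_ofNat]; simp [Nat.isValidChar]; omega
theorem pv_lowerChar_toNat (c : Char) : (PySem.Chars.lowerChar c).toNat =
    if 65 ≤ c.toNat ∧ c.toNat ≤ 90 then c.toNat + 32 else c.toNat := by
  unfold PySem.Chars.lowerChar
  by_cases h : PySem.Chars.isupper c = true
  · have hb := (pv_isupper_iff c).mp h
    have hv := pv_toNat_ofNat (c.toNat + 32) (by omega)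
    simp [h, hv, hb]
  · have hb : ¬ (65 ≤ c.toNat ∧ c.toNat ≤ 90) := fun hc => h ((pv_isupper_iff c).mpr hc)
    simp [h, hb]
theorem pv_mod26 (a : Int) : PySem.Int.mod a 26 = a % 26 :=
  PySem.Int.mod_eq_emod_of_pos (by norm_num)

theorem pv_dec_eq_target (sh : Int) (h1 : 1 ≤ sh) (h2 : sh ≤ 25) (x t : Char)
    (hU : ¬ (65 ≤ x.toNat ∧ x.toNat ≤ 90))
    (ht : 97 ≤ t.toNat ∧ t.toNat ≤ 122) :
    ((if PySem.Chars.isalpha x then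
        Char.ofNat ((if ((PySem.Chars.lowerChar x).toNat : Int) - sh < 97
          then ((PySem.Chars.lowerChar x).toNat : Int) - sh + 26
          else ((PySem.Chars.lowerChar x).toNat : Int) - sh)).toNat
      else x) = t)
    ↔ (PySem.Chars.isalpha x = true ∧ PySem.Int.mod ((x.toNat : Int) - (t.toNat : Int)) 26 = sh) := by
  rw [pv_mod26]
  by_cases ha : PySem.Chars.isalpha x = true
  · have hx : 97 ≤ x.toNat ∧ x.toNat ≤ 122 := by
      rcases (pv_isalpha_iff x).mp ha with h | h
      · exact absurd h hU
      · exact h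
    have hl : (PySem.Chars.lowerChar x).toNat = x.toNat := by
      rw [pv_lowerChar_toNat]; simp [hU]
    rw [if_pos ha, hl, pv_char_eq_iff]
    have hv : ((if (x.toNat : Int) - sh < 97 then (x.toNat : Int) - sh + 26
        else (x.toNat : Int) - sh)).toNat < 55296 := by split <;> omega
    rw [pv_toNat_ofNat _ hv]
    constructor
    · intro h; refine ⟨ha, ?_⟩; split at h <;> omega
    · intro ⟨_, h⟩; split <;> omega
  · rw [if_neg ha]
    constructor
    · intro h
      exfalso
      rw [pv_char_eq_iff] at h
      exact ha ((pv_isalpha_iff x).mpr (Or.inr (h ▸ ht)))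
    · intro ⟨h, _⟩; exact absurd h ha

theorem pv_lower_no_upper (s : List Char) :
    ∀ x ∈ PySem.Chars.lower s, ¬ (65 ≤ x.toNat ∧ x.toNat ≤ 90) := by
  intro x hx
  simp only [PySem.Chars.lower, List.mem_map] at hx
  obtain ⟨c, _, rfl⟩ := hx
  rw [pv_lowerChar_toNat]
  split <;> omega

theorem pv_lower_caesar (s : List Char) (sh : Int) (h1 : 1 ≤ sh) (h2 : sh ≤ 25) :
    PySem.Chars.lower (pvCaesarDecode s sh) =
      (PySem.Chars.lower s).map (fun x =>
        if PySem.Chars.isalpha x then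
          Char.ofNat ((if ((PySem.Chars.lowerChar x).toNat : Int) - sh < 97
            then ((PySem.Chars.lowerChar x).toNat : Int) - sh + 26
            else ((PySem.Chars.lowerChar x).toNat : Int) - sh)).toNat
        else x) := by
  have hmap : pvCaesarDecode s sh = s.map (fun c =>
      if PySem.Chars.isalpha c then
        Char.ofNat ((if ((PySem.Chars.lowerChar c).toNat : Int) - sh < 97
          then ((PySem.Chars.lowerChar c).toNat : Int) - sh + 26
          else ((PySem.Chars.lowerChar c).toNat : Int) - sh)).toNat
      else c) := by
    unfold pvCaesarDecode
    have hb : (fun (acc : List Char) (c : Char) =>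
        if PySem.Chars.isalpha c then
          let code : Int := ((PySem.Chars.lowerChar c).toNat : Int) - sh
          let code2 : Int := if code < 97 then code + 26 else code
          acc ++ [Char.ofNat code2.toNat]
        else acc ++ [c]) = (fun acc c => acc ++ [(fun c =>
          if PySem.Chars.isalpha c then
            Char.ofNat ((if ((PySem.Chars.lowerChar c).toNat : Int) - sh < 97
              then ((PySem.Chars.lowerChar c).toNat : Int) - sh + 26
              else ((PySem.Chars.lowerChar c).toNat : Int) - sh)).toNat
          else c) c]) := by
      funext acc c; split <;> rename_i h <;> simp [h]
    rw [hb, PySem.List.foldl_append_singleton_eq_map]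
    simp
  rw [hmap]
  simp only [PySem.Chars.lower, List.map_map]
  congr 1
  funext c
  simp only [Function.comp]
  by_cases ha : PySem.Chars.isalpha c = true
  · -- alpha: decoded char is a lowercase letter, lowerChar fixes it
    have hlc : 97 ≤ (PySem.Chars.lowerChar c).toNat ∧ (PySem.Chars.lowerChar c).toNat ≤ 122 := by
      rw [pv_lowerChar_toNat]
      rcases (pv_isalpha_iff c).mp ha with h | h <;> split <;> omega
    have ha' : PySem.Chars.isalpha (PySem.Chars.lowerChar c) = true :=
      (pv_isalpha_iff _).mpr (Or.inr hlc)
    have hll : PySem.Chars.lowerChar (PySem.Chars.lowerChar c) = PySem.Chars.lowerChar c := by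
      rw [pv_char_eq_iff, pv_lowerChar_toNat]
      split <;> omega
    rw [if_pos ha, if_pos ha', hll]
    -- lowerChar of the decoded (lowercase) char is itself
    set v : Nat := ((if ((PySem.Chars.lowerChar c).toNat : Int) - sh < 97
        then ((PySem.Chars.lowerChar c).toNat : Int) - sh + 26
        else ((PySem.Chars.lowerChar c).toNat : Int) - sh)).toNat with hvdef
    have hvb : 97 ≤ v ∧ v ≤ 122 := by rw [hvdef]; constructor <;> [skip; skip] <;> split <;> omega
    rw [pv_char_eq_iff, pv_lowerChar_toNat, pv_toNat_ofNat v (by omega)]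
    simp only [if_neg (by omega : ¬ (65 ≤ v ∧ v ≤ 90))]
  · -- not alpha: lowerChar c = c
    have hnu : ¬ (65 ≤ c.toNat ∧ c.toNat ≤ 90) :=
      fun h => ha ((pv_isalpha_iff c).mpr (Or.inl h))
    have hl : PySem.Chars.lowerChar c = c := by
      rw [pv_char_eq_iff, pv_lowerChar_toNat]; simp [hnu]
    simp only [hl, if_neg ha]

theorem pv_triple_prefix (a b c : Char) (ys : List Char) :
    [a, b, c] <+: ys ↔ ys[0]? = some a ∧ ys[1]? = some b ∧ ys[2]? = some c := by
  constructor
  · rintro ⟨t, rfl⟩; simp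
  · intro ⟨h0, h1, h2⟩
    match ys, h0, h1, h2 with
    | x :: y :: z :: rest, h0, h1, h2 =>
      simp at h0 h1 h2
      exact ⟨rest, by simp [h0, h1, h2]⟩

theorem pv_cand_bounds (L : List Char) (j : Nat) (sh : Int)
    (h : pvCandAt L j = some sh) : 1 ≤ sh ∧ sh ≤ 25 := by
  unfold pvCandAt at h
  cases h0 : L[j]? with
  | none => rw [h0] at h; simp at h
  | some a => cases h1 : L[j+1]? with
    | none => rw [h0, h1] at h; simp at h
    | some b => cases h2 : L[j+2]? with
      | none => rw [h0, h1, h2] at h; simp at h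
      | some c =>
        rw [h0, h1, h2] at h
        simp only [pv_mod26] at h
        split at h
        · split at h
          · rename_i hcond
            simp only [Option.some_inj] at h
            have hnn := Int.emod_nonneg ((a.toNat : Int) - 116) (by norm_num : (26:Int) ≠ 0)
            have hlt := Int.emod_lt_of_pos ((a.toNat : Int) - 116) (by norm_num : (0:Int) < 26)
            have h0' := hcond.1
            omega
          · simp at h
        · simp at h

theorem pv_window_iff (L : List Char) (hU : ∀ x ∈ L, ¬ (65 ≤ x.toNat ∧ x.toNat ≤ 90))
    (sh : Int) (h1 : 1 ≤ sh) (h2 : sh ≤ 25) (j : Nat) :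
    ['t', 'h', 'e'] <+: (L.map (fun x =>
        if PySem.Chars.isalpha x then
          Char.ofNat ((if ((PySem.Chars.lowerChar x).toNat : Int) - sh < 97
            then ((PySem.Chars.lowerChar x).toNat : Int) - sh + 26
            else ((PySem.Chars.lowerChar x).toNat : Int) - sh)).toNat
        else x)).drop j
    ↔ pvCandAt L j = some sh := by
  rw [pv_triple_prefix]
  simp only [List.getElem?_drop, List.getElem?_map]
  unfold pvCandAt
  cases h0 : L[j]? with
  | none => simp [h0]
  | some a => cases hh1 : L[j+1]? with
    | none => simp [h0, hh1]
    | some b => cases hh2 : L[j+2]? with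
      | none => simp [h0, hh1, hh2]
      | some c =>
        simp only [h0, hh1, hh2, Option.map_some]
        have ha := pv_dec_eq_target sh h1 h2 a 't' (hU a (List.mem_of_getElem? h0)) (by decide)
        have hb := pv_dec_eq_target sh h1 h2 b 'h' (hU b (List.mem_of_getElem? hh1)) (by decide)
        have hc := pv_dec_eq_target sh h1 h2 c 'e' (hU c (List.mem_of_getElem? hh2)) (by decide)
        rw [Option.some_inj, Option.some_inj, Option.some_inj]
        rw [ha, hb, hc]
        simp only [show ('t'.toNat : Int) = 116 from rfl, show ('h'.toNat : Int) = 104 from rfl,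
          show ('e'.toNat : Int) = 101 from rfl]
        constructor
        · rintro ⟨⟨haa, ham⟩, ⟨hba, hbm⟩, ⟨hca, hcm⟩⟩
          rw [if_pos (by simp [haa, hba, hca])]
          rw [ham, hbm, hcm, if_pos ⟨by omega, rfl, rfl⟩]
        · intro h
          split at h
          · rename_i halpha
            split at h
            · rename_i hcond
              simp only [Option.some_inj] at h
              simp only [Bool.and_eq_true] at halpha
              obtain ⟨hc0, hcb, hcc⟩ := hcond
              exact ⟨⟨halpha.1.1, h ▸ rfl⟩, ⟨halpha.1.2, by rw [hcb, h]⟩, ⟨halpha.2, by rw [hcc, h]⟩⟩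
            · exact absurd h (by simp)
          · exact absurd h (by simp)

theorem pv_isbest_unique (L : List Char) (r r' : Option (Int × Nat))
    (h : pvIsBest L r) (h' : pvIsBest L r') : r = r' := by
  match r, r', h, h' with
  | none, none, _, _ => rfl
  | none, some p, h, h' => exact absurd h'.1 (by rw [h p.2]; simp)
  | some p, none, h, h' => exact absurd h.1 (by rw [h' p.2]; simp)
  | some p, some q, h, h' =>
    have h1 := h.2 q.2 q.1 h'.1
    have h2 := h'.2 p.2 p.1 h.1
    unfold pvLexLt at h1 h2
    simp only [not_or, not_and] at h1 h2
    have : p.1 = q.1 ∧ p.2 = q.2 := by omega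
    rw [Option.some_inj]
    exact Prod.ext this.1 this.2

theorem pv_cand_oob (L : List Char) (j : Nat) (h : L.length ≤ j + 2) : pvCandAt L j = none := by
  unfold pvCandAt
  rw [List.getElem?_eq_none (by omega : L.length ≤ j + 2)]
  cases L[j]? <;> cases L[j+1]? <;> rfl

theorem pv_short_isbest (L : List Char) (i : Nat) (best : Option (Int × Nat))
    (hs : L.length ≤ i + 2) (hpb : pvPartialBest L i best) : pvIsBest L best := by
  match best with
  | none =>
    intro j
    by_cases hj : j < i
    · exact hpb j hj
    · exact pv_cand_oob L j (by omega)
  | some p =>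
    obtain ⟨hlt, hc, hmin⟩ := hpb
    refine ⟨hc, fun j sh hj => ?_⟩
    by_cases hj' : j < i
    · exact hmin j sh hj' hj
    · rw [pv_cand_oob L j (by omega)] at hj; cases hj

theorem pv_lexlt_trans (p q r : Int × Nat) (h1 : pvLexLt p q) (h2 : pvLexLt q r) : pvLexLt p r := by
  unfold pvLexLt at *; omega

theorem pv_partial_extend_none (L : List Char) (i : Nat) (best : Option (Int × Nat))
    (hpb : pvPartialBest L i best) (hc : pvCandAt L i = none) :
    pvPartialBest L (i + 1) best := by
  match best with
  | none =>
    intro j hj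
    by_cases hj' : j < i
    · exact hpb j hj'
    · have : j = i := by omega
      rw [this]; exact hc
  | some p =>
    obtain ⟨h1, h2, h3⟩ := hpb
    refine ⟨by omega, h2, fun j sh hj hcand => ?_⟩
    by_cases hj' : j < i
    · exact h3 j sh hj' hcand
    · have : j = i := by omega
      rw [this, hc] at hcand; cases hcand

theorem pv_bloop_spec (L : List Char) : ∀ (n : Nat) (t : List Char) (i : Nat)
    (best : Option (Int × Nat)), t.length = n → L.drop i = t → pvPartialBest L i best →
    pvIsBest L (pvBLoop best i t) := by
  intro n
  induction n with
  | zero =>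
    intro t i best hlen hdrop hpb
    match t, hlen with
    | [], _ =>
      have hs : L.length ≤ i + 2 := by
        have := congrArg List.length hdrop; simp at this; omega
      exact pv_short_isbest L i best hs hpb
  | succ n ih =>
    intro t i best hlen hdrop hpb
    match t with
    | [] => exact absurd hlen (by simp)
    | [a] =>
      have hs : L.length ≤ i + 2 := by
        have := congrArg List.length hdrop; simp at this; omega
      exact pv_short_isbest L i best hs hpb
    | [a, b] =>
      have hs : L.length ≤ i + 2 := by
        have := congrArg List.length hdrop; simp at this; omega
      exact pv_short_isbest L i best hs hpb
    | a :: b :: c :: rest =>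
      have hL0 : L[i]? = some a := by
        have h := List.getElem?_drop (xs := L) (i := i) (j := 0)
        rw [hdrop] at h; simpa using h.symm
      have hL1 : L[i+1]? = some b := by
        have h := List.getElem?_drop (xs := L) (i := i) (j := 1)
        rw [hdrop] at h; simpa using h.symm
      have hL2 : L[i+2]? = some c := by
        have h := List.getElem?_drop (xs := L) (i := i) (j := 2)
        rw [hdrop] at h; simpa using h.symm
      have hdrop' : L.drop (i + 1) = b :: c :: rest := by
        have : List.drop 1 (List.drop i L) = List.drop (i + 1) L := by
          rw [List.drop_drop]
        rw [← this, hdrop]; rfl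
      have hcand : pvCandAt L i =
          (if PySem.Chars.isalpha a && PySem.Chars.isalpha b && PySem.Chars.isalpha c then
            let sh := PySem.Int.mod ((a.toNat : Int) - 116) 26
            if sh ≠ 0 ∧ PySem.Int.mod ((b.toNat : Int) - 104) 26 = sh
                ∧ PySem.Int.mod ((c.toNat : Int) - 101) 26 = sh then some sh else none
          else none) := by
        unfold pvCandAt
        rw [hL0, hL1, hL2]
      by_cases halpha : (PySem.Chars.isalpha a && PySem.Chars.isalpha b && PySem.Chars.isalpha c) = true
      · by_cases hcond : PySem.Int.mod ((a.toNat : Int) - 116) 26 ≠ 0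
            ∧ PySem.Int.mod ((b.toNat : Int) - 104) 26 = PySem.Int.mod ((a.toNat : Int) - 116) 26
            ∧ PySem.Int.mod ((c.toNat : Int) - 101) 26 = PySem.Int.mod ((a.toNat : Int) - 116) 26
        · -- window at i is a candidate with shift shv
          have hc : pvCandAt L i = some (PySem.Int.mod ((a.toNat : Int) - 116) 26) := by
            rw [hcand]; simp only [halpha, if_true]; exact if_pos hcond
          match best with
          | none =>
            simp only [pvBLoop]
            rw [if_pos halpha, if_pos hcond]
            refine ih (b :: c :: rest) (i + 1)
              (some (PySem.Int.mod ((a.toNat : Int) - 116) 26, i)) (by simpa using hlen) hdrop' ?_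
            refine ⟨by omega, hc, fun j sh hj hcand' => ?_⟩
            by_cases hj' : j < i
            · rw [hpb j hj'] at hcand'; cases hcand'
            · have hje : j = i := by omega
              rw [hje, hc] at hcand'
              have : sh = PySem.Int.mod ((a.toNat : Int) - 116) 26 := by
                exact (Option.some_inj.mp hcand').symm
              rw [hje, this]
              unfold pvLexLt; omega
          | some q =>
            obtain ⟨hq1, hq2, hq3⟩ := hpb
            by_cases hlt : PySem.Int.mod ((a.toNat : Int) - 116) 26 < q.1
                ∨ (PySem.Int.mod ((a.toNat : Int) - 116) 26 = q.1 ∧ i < q.2)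
            · simp only [pvBLoop]
              rw [if_pos halpha, if_pos hcond, if_pos hlt]
              refine ih (b :: c :: rest) (i + 1)
                (some (PySem.Int.mod ((a.toNat : Int) - 116) 26, i)) (by simpa using hlen) hdrop' ?_
              refine ⟨by omega, hc, fun j sh hj hcand' => ?_⟩
              by_cases hj' : j < i
              · intro hl
                exact hq3 j sh hj' hcand' (pv_lexlt_trans _ _ _ hl hlt)
              · have hje : j = i := by omega
                rw [hje, hc] at hcand'
                have : sh = PySem.Int.mod ((a.toNat : Int) - 116) 26 := by
                  exact (Option.some_inj.mp hcand').symm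
                rw [hje, this]
                unfold pvLexLt; omega
            · simp only [pvBLoop]
              rw [if_pos halpha, if_pos hcond, if_neg hlt]
              refine ih (b :: c :: rest) (i + 1) (some q) (by simpa using hlen) hdrop' ?_
              refine ⟨by omega, hq2, fun j sh hj hcand' => ?_⟩
              by_cases hj' : j < i
              · exact hq3 j sh hj' hcand'
              · have hje : j = i := by omega
                rw [hje, hc] at hcand'
                have : sh = PySem.Int.mod ((a.toNat : Int) - 116) 26 := by
                  exact (Option.some_inj.mp hcand').symm
                rw [hje, this]
                exact hlt
        · have hc : pvCandAt L i = none := by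
            rw [hcand]; simp only [halpha, if_true]; exact if_neg hcond
          simp only [pvBLoop]
          rw [if_pos halpha, if_neg hcond]
          exact ih (b :: c :: rest) (i + 1) best (by simpa using hlen) hdrop'
            (pv_partial_extend_none L i best hpb hc)
      · have hc : pvCandAt L i = none := by
          rw [hcand]; simp only [halpha]; rfl
        simp only [pvBLoop]
        rw [if_neg (by simp [halpha])]
        exact ih (b :: c :: rest) (i + 1) best (by simpa using hlen) hdrop'
          (pv_partial_extend_none L i best hpb hc)

theorem pv_aloop_spec (s : List Char) (r : Option (Int × Nat))
    (hbest : pvIsBest (PySem.Chars.lower s) r) :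
    ∀ (k : Nat), k ≤ 25 →
    (∀ j sh, pvCandAt (PySem.Chars.lower s) j = some sh → 26 - (k : Int) ≤ sh) →
    pvALoop s (PySem.List.pyRange (26 - (k : Int)) 26) = pvIdxOf r := by
  intro k
  induction k with
  | zero =>
    intro _ hlow
    have hnil : PySem.List.pyRange (26 - ((0 : Nat) : Int)) 26 = [] := by decide
    rw [hnil]
    match r with
    | none => rfl
    | some p =>
      show _ = ((p.2 : Nat) : Int)
      exfalso
      have hb := pv_cand_bounds _ p.2 p.1 hbest.1
      have := hlow p.2 p.1 hbest.1
      norm_num at this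
      omega
  | succ k ih =>
    intro hk hlow
    have ha1 : (1 : Int) ≤ 26 - ((k + 1 : Nat) : Int) := by push_cast; omega
    have ha2 : 26 - ((k + 1 : Nat) : Int) ≤ 25 := by push_cast; omega
    rw [PySem.List.pyRange_one_cons (by push_cast; omega)]
    simp only [pvALoop]
    rw [pv_lower_caesar s _ ha1 ha2]
    set sh : Int := 26 - ((k + 1 : Nat) : Int) with hsh
    set L := PySem.Chars.lower s with hL
    set M := L.map (fun x =>
        if PySem.Chars.isalpha x then
          Char.ofNat ((if ((PySem.Chars.lowerChar x).toNat : Int) - sh < 97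
            then ((PySem.Chars.lowerChar x).toNat : Int) - sh + 26
            else ((PySem.Chars.lowerChar x).toNat : Int) - sh)).toNat
        else x) with hM
    have hU := pv_lower_no_upper s
    by_cases hin : PySem.Chars.isIn ['t', 'h', 'e'] M = true
    · rw [if_pos hin]
      have hex : ∃ j, ['t','h','e'] <+: M.drop j :=
        (PySem.Chars.exists_prefix_drop_iff_isIn _ _).mpr hin
      have hf0 : 0 ≤ PySem.Chars.find M ['t','h','e'] := by
        rw [PySem.Chars.find_nonneg_iff]
        obtain ⟨j, hj⟩ := hex
        exact (hj.isInfix).trans (List.drop_suffix j M).isInfix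
      obtain ⟨hpre, hmin⟩ := PySem.Chars.find_spec hf0
      set j0 : Nat := (PySem.Chars.find M ['t','h','e']).toNat with hj0
      have hcand : pvCandAt L j0 = some sh := (pv_window_iff L hU sh ha1 ha2 j0).mp hpre
      have hIB : pvIsBest L (some (sh, j0)) := by
        refine ⟨hcand, fun j sh' hc hlt => ?_⟩
        have hge := hlow j sh' hc
        rcases hlt with h | ⟨he, hjlt⟩
        · omega
        · have he' : sh' = sh := he
          have hc' : pvCandAt L j = some sh := by rw [← he']; exact hc
          have hpj : ['t','h','e'] <+: M.drop j := (pv_window_iff L hU sh ha1 ha2 j).mpr hc'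
          exact hmin j hjlt hpj
      have := pv_isbest_unique L r (some (sh, j0)) hbest hIB
      rw [this]
      show _ = ((j0 : Nat) : Int)
      rw [hj0, Int.toNat_of_nonneg hf0]
    · rw [if_neg hin]
      have hnone : ∀ j, pvCandAt L j ≠ some sh := by
        intro j hj
        exact hin ((PySem.Chars.exists_prefix_drop_iff_isIn _ _).mp
          ⟨j, (pv_window_iff L hU sh ha1 ha2 j).mpr hj⟩)
      have hstep : 26 - ((k + 1 : Nat) : Int) + 1 = 26 - ((k : Nat) : Int) := by push_cast; ring
      rw [hstep]
      exact ih (by omega) (fun j sh' hc => by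
        have h1 := hlow j sh' hc
        have hq : sh' ≠ sh := fun hq => (hnone j) (hq ▸ hc)
        have h2 := hsh
        push_cast at h2 ⊢
        omega)

-- ===== VERDICT (by name: the statement is the Claim_ definition above) =====
theorem find_the_index_spec : Claim_equal_find_the_index := by
  intro sentence _
  unfold Spec_find_the_index find_the_index find_the_index_alt
  have hbest : pvIsBest (PySem.Chars.lower sentence.toList)
      (pvBLoop none 0 (PySem.Chars.lower sentence.toList)) := by
    refine pv_bloop_spec _ _ _ 0 none rfl (by simp) ?_
    intro j hj; omega
  have hlow : ∀ j sh, pvCandAt (PySem.Chars.lower sentence.toList) j = some sh →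
      26 - ((25 : Nat) : Int) ≤ sh :=
    fun j sh h => by have := pv_cand_bounds _ j sh h; omega
  cases hr : pvBLoop none 0 (PySem.Chars.lower sentence.toList) with
  | none =>
      rw [hr] at hbest
      have h2 := pv_aloop_spec sentence.toList none hbest 25 (le_refl _) hlow
      norm_num at h2
      rw [h2]
      rfl
  | some q =>
      rw [hr] at hbest
      have h2 := pv_aloop_spec sentence.toList (some q) hbest 25 (le_refl _) hlow
      norm_num at h2
      rw [h2]
      rfl
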